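-- pv_equiv track=rewrite | github.com/A2-Collaboration/ant | extra/SimulationBlaster/parse_pluto_string.py | particle_list_to_string
-- ===== SOURCE A (Python) =====
-- from itertools import groupby
--
-- def particle_list_to_string(plist, group=2):
--     """Converts a given list with particles into a string
--     same particles are grouped if greater than group=2, the second argument's default value"""
--     grouped_list = [[i, len(list(j))] for i, j in groupby(sorted(plist))]
--     string = ''
--     for part, count in grouped_list:
--         if count > group:
--             string += '%d%s' % (count, part)
--         else:
--             string += part*count
--     return string.replace("eta'", 'etap')
-- ===== SOURCE B (Python) =====
-- def _merge(a, b):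
--     """merge two run-length encodings with ascending distinct keys, adding counts of equal keys"""
--     res = []
--     i = j = 0
--     while i < len(a) and j < len(b):
--         pa, ca = a[i]
--         pb, cb = b[j]
--         if pa < pb:
--             res.append(a[i])
--             i += 1
--         elif pb < pa:
--             res.append(b[j])
--             j += 1
--         else:
--             res.append((pa, ca + cb))
--             i += 1
--             j += 1
--     res.extend(a[i:])
--     res.extend(b[j:])
--     return res
--
--
-- def _grp(lst):
--     """divide and conquer: run-length encoding of lst's elements in ascending order"""
--     if len(lst) <= 1:
--         return [(x, 1) for x in lst]
--     mid = len(lst) // 2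
--     return _merge(_grp(lst[:mid]), _grp(lst[mid:]))
--
--
-- def particle_list_to_string(plist, group=2):
--     """Converts a given list with particles into a string
--     same particles are grouped if greater than group=2, the second argument's default value"""
--     string = ''
--     for part, count in _grp(plist):
--         if count > group:
--             string += '%d%s' % (count, part)
--         else:
--             string += part * count
--     return string.replace("eta'", 'etap')
-- ===== Notes on version B (the rewrite author's own statement) =====
-- stated objective: alternative
-- what changed: Replaces sort-the-whole-list + itertools.groupby by a divide-and-conquer grouping: each element becomes a one-run encoding, halves are grouped recursively and merged two-pointer style with counts of equal particles added, so no sort, no groupby and no dict ever materialises the full sorted list.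
import Mathlib
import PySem

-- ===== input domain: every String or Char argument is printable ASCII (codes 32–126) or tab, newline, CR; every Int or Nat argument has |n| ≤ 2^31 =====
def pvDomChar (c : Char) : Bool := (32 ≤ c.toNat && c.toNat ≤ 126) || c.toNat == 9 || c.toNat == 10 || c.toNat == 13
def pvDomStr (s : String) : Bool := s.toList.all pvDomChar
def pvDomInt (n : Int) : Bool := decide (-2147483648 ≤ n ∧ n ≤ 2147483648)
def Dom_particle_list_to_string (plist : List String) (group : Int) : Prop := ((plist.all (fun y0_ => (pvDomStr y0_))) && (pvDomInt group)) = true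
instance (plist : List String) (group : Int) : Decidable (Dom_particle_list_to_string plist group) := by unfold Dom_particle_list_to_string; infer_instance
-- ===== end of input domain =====

-- B replaces sort-the-whole-list + groupby by a divide-and-conquer grouping: one-run
-- encodings of the halves are merged two-pointer style, adding counts of equal particles.

-- exact model of Python `s * n` for strings (n ≤ 0 gives ""), used by both ports
def strRepeat (s : String) (n : Int) : String :=
  (List.replicate n.toNat s).foldl (· ++ ·) ""

-- ===== PORT A =====
-- hand port of `[[i, len(list(j))] for i, j in groupby(xs)]` (default key: maximal runs of
-- consecutive equal elements with their lengths); exact for any list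
def runs : List String → List (String × Int)
  | [] => []
  | x :: xs => (x, 1 + ((xs.takeWhile (x == ·)).length : Int)) :: runs (xs.dropWhile (x == ·))
termination_by l => l.length
decreasing_by
  simp only [List.length_cons]
  exact Nat.lt_succ_of_le (List.length_dropWhile_le _ _)

def particle_list_to_string (plist : List String) (group : Int) : String :=
  let grouped_list := runs (PySem.List.sorted plist (fun x => x) false)
  let string := grouped_list.foldl
    (fun acc pc =>
      if pc.2 > group then acc ++ (PySem.Int.toStr pc.2 ++ pc.1)
      else acc ++ strRepeat pc.1 pc.2) ""
  PySem.Str.replace string "eta'" "etap"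

-- ===== PORT B =====
-- hand port of _merge's two-pointer while loop: the index pair (i, j) walking a and b is the
-- structural recursion on the two unconsumed suffixes; res.extend(a[i:]) / res.extend(b[j:])
-- are the base cases; exact for any lists
def mergeRLE : List (String × Int) → List (String × Int) → List (String × Int)
  | [], b => b
  | a, [] => a
  | (pa, ca) :: ta, (pb, cb) :: tb =>
    if pa < pb then (pa, ca) :: mergeRLE ta ((pb, cb) :: tb)
    else if pb < pa then (pb, cb) :: mergeRLE ((pa, ca) :: ta) tb
    else (pa, ca + cb) :: mergeRLE ta tb
termination_by a b => a.length + b.length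

-- hand port of _grp: `mid = len(lst)//2` on a nonnegative length is Nat division, and the
-- slices lst[:mid] / lst[mid:] with 0 ≤ mid ≤ len are exactly take/drop
def grp (l : List String) : List (String × Int) :=
  if l.length ≤ 1 then l.map (fun x => (x, 1))
  else mergeRLE (grp (l.take (l.length / 2))) (grp (l.drop (l.length / 2)))
termination_by l.length
decreasing_by
  · simp only [List.length_take]; omega
  · simp only [List.length_drop]; omega

def particle_list_to_string_alt (plist : List String) (group : Int) : String :=
  let string := (grp plist).foldl
    (fun acc pc =>
      if pc.2 > group then acc ++ (PySem.Int.toStr pc.2 ++ pc.1)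
      else acc ++ strRepeat pc.1 pc.2) ""
  PySem.Str.replace string "eta'" "etap"

-- ===== PRECONDITION & SPEC =====
def Spec_particle_list_to_string (plist : List String) (group : Int) (out : String) : Prop := out = particle_list_to_string_alt plist group
instance (plist : List String) (group : Int) (out : String) : Decidable (Spec_particle_list_to_string plist group out) := by unfold Spec_particle_list_to_string; infer_instance

-- ===== CLAIM (what is proved, stated in full; the proofs are below) =====
def Claim_equal_particle_list_to_string : Prop := ∀ (plist : List String) (group : Int), Dom_particle_list_to_string plist group → Spec_particle_list_to_string plist group (particle_list_to_string plist group)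

-- ===== LEMMAS AND PROOFS =====

theorem dropWhile_head_false {α : Type} (p : α → Bool) :
    ∀ (xs : List α) (h : α) (t : List α), xs.dropWhile p = h :: t → p h = false := by
  intro xs
  induction xs with
  | nil => intro h t hc; simp [List.dropWhile] at hc
  | cons a as ih =>
    intro h t hc
    by_cases hpa : p a
    · rw [List.dropWhile_cons_of_pos hpa] at hc
      exact ih h t hc
    · rw [List.dropWhile_cons_of_neg hpa] at hc
      obtain ⟨rfl, -⟩ := List.cons.inj hc
      simpa using hpa

-- run-length structure of a sorted list: strictly increasing run heads that are exactly the
-- members, each run length the total count of its head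
theorem runs_spec : ∀ (n : Nat) (s : List String), s.length ≤ n → s.Pairwise (· ≤ ·) →
    ((runs s).map Prod.fst).Pairwise (· < ·) ∧
    (∀ k, k ∈ (runs s).map Prod.fst ↔ k ∈ s) ∧
    (∀ pc ∈ runs s, pc.2 = (s.count pc.1 : Int)) := by
  intro n
  induction n with
  | zero =>
    intro s hlen _
    have : s = [] := List.eq_nil_of_length_eq_zero (Nat.le_zero.mp hlen)
    subst this
    simp [runs]
  | succ n ih =>
    intro s hlen hs
    cases s with
    | nil => simp [runs]
    | cons x xs =>
      have hx_le : ∀ z ∈ xs, x ≤ z := (List.pairwise_cons.mp hs).1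
      have hxs : xs.Pairwise (· ≤ ·) := (List.pairwise_cons.mp hs).2
      set pre := xs.takeWhile (x == ·) with hpre
      set rest := xs.dropWhile (x == ·) with hrest
      have hsplit : pre ++ rest = xs := List.takeWhile_append_dropWhile
      have hpre_eq : ∀ z ∈ pre, z = x := by
        intro z hz
        have := List.mem_takeWhile_imp hz
        exact (beq_iff_eq.mp this).symm
      have hrest_sub : rest.Sublist xs := List.dropWhile_sublist _
      have hrest_pw : rest.Pairwise (· ≤ ·) := List.Pairwise.sublist hrest_sub hxs
      have hrest_gt : ∀ z ∈ rest, x < z := by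
        cases hr : rest with
        | nil => simp
        | cons h t =>
          have hdw : xs.dropWhile (x == ·) = h :: t := by rw [← hrest]; exact hr
          have hh_ne : (x == h) = false := dropWhile_head_false _ xs h t hdw
          have hh_mem : h ∈ xs := hrest_sub.subset (by rw [hr]; simp)
          have hxh : x < h := lt_of_le_of_ne (hx_le h hh_mem) (by simpa using hh_ne)
          intro z hz
          rcases (by simpa [hr] using hz : z = h ∨ z ∈ t) with rfl | hzt
          · exact hxh
          · have : h ≤ z := (List.pairwise_cons.mp (by rwa [hr] at hrest_pw)).1 z hzt
            exact lt_of_lt_of_le hxh this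
      have hrest_len : rest.length ≤ n := by
        have h1 : rest.length ≤ xs.length := List.length_dropWhile_le _ _
        have h2 : xs.length ≤ n := by simpa using Nat.le_of_succ_le_succ hlen
        omega
      obtain ⟨ihpw, ihmem, ihcnt⟩ := ih rest hrest_len hrest_pw
      have hx_notin_rest : x ∉ rest := fun h => lt_irrefl x (hrest_gt x h)
      have hcount_x : (x :: xs).count x = 1 + pre.length := by
        have h1 : pre.count x = pre.length := List.count_eq_length.mpr (by
          intro b hb; exact (hpre_eq b hb).symm)
        have h2 : rest.count x = 0 := List.count_eq_zero.mpr hx_notin_rest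
        rw [← hsplit]
        simp [List.count_append, h1, h2]
        omega
      have hcount_rest : ∀ k ∈ rest, (x :: xs).count k = rest.count k := by
        intro k hk
        have hkx : x ≠ k := fun h => (hx_notin_rest (h ▸ hk))
        have h2 : pre.count k = 0 := List.count_eq_zero.mpr (by
          intro hkp; exact hkx ((hpre_eq k hkp).symm))
        rw [← hsplit]
        simp [List.count_append, h2, hkx]
      have hruns : runs (x :: xs) = (x, 1 + ((pre.length : Nat) : Int)) :: runs rest := by
        rw [runs]
      refine ⟨?_, ?_, ?_⟩
      · rw [hruns]
        simp only [List.map_cons, List.pairwise_cons]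
        refine ⟨?_, ihpw⟩
        intro k hk
        exact hrest_gt k ((ihmem k).mp hk)
      · intro k
        rw [hruns]
        simp only [List.map_cons, List.mem_cons, ihmem]
        constructor
        · rintro (rfl | hk)
          · simp
          · exact Or.inr (hrest_sub.subset hk)
        · rintro (rfl | hk)
          · exact Or.inl rfl
          · rcases (by rw [← hsplit] at hk; simpa using hk : k ∈ pre ∨ k ∈ rest) with hp | hr
            · exact Or.inl (hpre_eq k hp)
            · exact Or.inr hr
      · intro pc hpc
        rw [hruns] at hpc
        rcases List.mem_cons.mp hpc with rfl | hpc
        · simp only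
          rw [hcount_x]
          push_cast
          ring
        · have h1 := ihcnt pc hpc
          have hmem : pc.1 ∈ rest := (ihmem pc.1).mp (List.mem_map_of_mem hpc)
          rw [h1, hcount_rest pc.1 hmem]

-- multiplicity function of a run-length encoding
def cnt : List (String × Int) → String → Int
  | [], _ => 0
  | (p, c) :: t, k => (if p = k then c else 0) + cnt t k

-- well-formed run-length encoding: strictly increasing keys, positive counts
def GoodRLE (r : List (String × Int)) : Prop :=
  (r.map Prod.fst).Pairwise (· < ·) ∧ ∀ pc ∈ r, 0 < pc.2

theorem cnt_nil (k : String) : cnt [] k = 0 := rfl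

theorem cnt_cons (p : String) (c : Int) (t : List (String × Int)) (k : String) :
    cnt ((p, c) :: t) k = (if p = k then c else 0) + cnt t k := rfl

theorem cnt_eq_zero {r : List (String × Int)} {k : String}
    (h : k ∉ r.map Prod.fst) : cnt r k = 0 := by
  induction r with
  | nil => rfl
  | cons pc t ih =>
    obtain ⟨p, c⟩ := pc
    simp only [List.map_cons, List.mem_cons, not_or] at h
    simp [cnt, Ne.symm h.1, ih h.2]

theorem cnt_of_nodup : ∀ (r : List (String × Int)), (r.map Prod.fst).Nodup →
    ∀ pc ∈ r, cnt r pc.1 = pc.2 := by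
  intro r
  induction r with
  | nil => intro _ pc hpc; simp at hpc
  | cons qd t ih =>
    obtain ⟨q, d⟩ := qd
    intro hnd pc hpc
    simp only [List.map_cons, List.nodup_cons] at hnd
    rcases List.mem_cons.mp hpc with rfl | hpc
    · simp [cnt, cnt_eq_zero hnd.1]
    · have hne : q ≠ pc.1 := by
        intro hq
        exact hnd.1 (hq ▸ List.mem_map_of_mem hpc)
      simp [cnt, hne, ih hnd.2 pc hpc]

theorem mergeRLE_keys : ∀ (a b : List (String × Int)) (k : String),
    k ∈ (mergeRLE a b).map Prod.fst → k ∈ a.map Prod.fst ∨ k ∈ b.map Prod.fst := by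
  intro a b
  induction a, b using mergeRLE.induct with
  | case1 b => intro k hk; rw [mergeRLE] at hk; exact Or.inr hk
  | case2 a h =>
    intro k hk
    cases a with
    | nil =>
      simp only [mergeRLE] at hk
      exact Or.inl hk
    | cons x t =>
      simp only [mergeRLE] at hk
      exact Or.inl hk
  | case3 pa ca ta pb cb tb h1 ih =>
    intro k hk
    rw [mergeRLE, if_pos h1] at hk
    rcases List.mem_cons.mp hk with rfl | hk
    · exact Or.inl (by simp)
    · rcases ih k hk with h | h
      · exact Or.inl (by simp [h])
      · exact Or.inr h
  | case4 pa ca ta pb cb tb h1 h2 ih =>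
    intro k hk
    rw [mergeRLE, if_neg h1, if_pos h2] at hk
    rcases List.mem_cons.mp hk with rfl | hk
    · exact Or.inr (by simp)
    · rcases ih k hk with h | h
      · exact Or.inl h
      · exact Or.inr (by simp [h])
  | case5 pa ca ta pb cb tb h1 h2 ih =>
    intro k hk
    rw [mergeRLE, if_neg h1, if_neg h2] at hk
    rcases List.mem_cons.mp hk with rfl | hk
    · exact Or.inl (by simp)
    · rcases ih k hk with h | h
      · exact Or.inl (by simp [h])
      · exact Or.inr (by simp [h])

theorem mergeRLE_good : ∀ (a b : List (String × Int)),
    GoodRLE a → GoodRLE b → GoodRLE (mergeRLE a b) := by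
  intro a b
  induction a, b using mergeRLE.induct with
  | case1 b => intro _ hb; simpa [mergeRLE] using hb
  | case2 a h => intro ha _; cases a with
    | nil => simpa [mergeRLE] using ha
    | cons x t => simpa [mergeRLE] using ha
  | case3 pa ca ta pb cb tb h1 ih =>
    rintro ⟨hapw, hapos⟩ ⟨hbpw, hbpos⟩
    have hta : ∀ z ∈ ta.map Prod.fst, pa < z := (List.pairwise_cons.mp hapw).1
    have htb : ∀ z ∈ tb.map Prod.fst, pb < z := (List.pairwise_cons.mp hbpw).1
    obtain ⟨ihpw, ihpos⟩ := ih ⟨(List.pairwise_cons.mp hapw).2, fun pc h => hapos pc (by simp [h])⟩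
      ⟨hbpw, hbpos⟩
    rw [mergeRLE, if_pos h1]
    constructor
    · simp only [List.map_cons, List.pairwise_cons]
      refine ⟨?_, ihpw⟩
      intro k hk
      rcases mergeRLE_keys _ _ k hk with h | h
      · exact hta k h
      · rcases (by simpa using h : k = pb ∨ k ∈ tb.map Prod.fst) with rfl | h
        · exact h1
        · exact lt_trans h1 (htb k h)
    · intro pc hpc
      rcases List.mem_cons.mp hpc with rfl | hpc
      · exact hapos (pa, ca) (by simp)
      · exact ihpos pc hpc
  | case4 pa ca ta pb cb tb h1 h2 ih =>
    rintro ⟨hapw, hapos⟩ ⟨hbpw, hbpos⟩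
    have hta : ∀ z ∈ ta.map Prod.fst, pa < z := (List.pairwise_cons.mp hapw).1
    have htb : ∀ z ∈ tb.map Prod.fst, pb < z := (List.pairwise_cons.mp hbpw).1
    obtain ⟨ihpw, ihpos⟩ := ih ⟨hapw, hapos⟩
      ⟨(List.pairwise_cons.mp hbpw).2, fun pc h => hbpos pc (by simp [h])⟩
    rw [mergeRLE, if_neg h1, if_pos h2]
    constructor
    · simp only [List.map_cons, List.pairwise_cons]
      refine ⟨?_, ihpw⟩
      intro k hk
      rcases mergeRLE_keys _ _ k hk with h | h
      · rcases (by simpa using h : k = pa ∨ k ∈ ta.map Prod.fst) with rfl | h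
        · exact h2
        · exact lt_trans h2 (hta k h)
      · exact htb k h
    · intro pc hpc
      rcases List.mem_cons.mp hpc with rfl | hpc
      · exact hbpos (pb, cb) (by simp)
      · exact ihpos pc hpc
  | case5 pa ca ta pb cb tb h1 h2 ih =>
    rintro ⟨hapw, hapos⟩ ⟨hbpw, hbpos⟩
    have hab : pa = pb := le_antisymm (not_lt.mp h2) (not_lt.mp h1)
    have hta : ∀ z ∈ ta.map Prod.fst, pa < z := (List.pairwise_cons.mp hapw).1
    have htb : ∀ z ∈ tb.map Prod.fst, pb < z := (List.pairwise_cons.mp hbpw).1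
    obtain ⟨ihpw, ihpos⟩ := ih
      ⟨(List.pairwise_cons.mp hapw).2, fun pc h => hapos pc (by simp [h])⟩
      ⟨(List.pairwise_cons.mp hbpw).2, fun pc h => hbpos pc (by simp [h])⟩
    rw [mergeRLE, if_neg h1, if_neg h2]
    constructor
    · simp only [List.map_cons, List.pairwise_cons]
      refine ⟨?_, ihpw⟩
      intro k hk
      rcases mergeRLE_keys _ _ k hk with h | h
      · exact hta k h
      · exact hab ▸ htb k h
    · intro pc hpc
      rcases List.mem_cons.mp hpc with rfl | hpc
      · have := hapos (pa, ca) (by simp)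
        have := hbpos (pb, cb) (by simp)
        simp only
        omega
      · exact ihpos pc hpc

theorem mergeRLE_cnt : ∀ (a b : List (String × Int)) (k : String),
    cnt (mergeRLE a b) k = cnt a k + cnt b k := by
  intro a b
  induction a, b using mergeRLE.induct with
  | case1 b => intro k; simp [mergeRLE, cnt]
  | case2 a h => intro k; cases a with
    | nil => simp [mergeRLE, cnt]
    | cons x t => simp [mergeRLE, cnt]
  | case3 pa ca ta pb cb tb h1 ih =>
    intro k
    rw [mergeRLE, if_pos h1]
    simp only [cnt, ih k]
    ring
  | case4 pa ca ta pb cb tb h1 h2 ih =>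
    intro k
    rw [mergeRLE, if_neg h1, if_pos h2]
    simp only [cnt, ih k]
    ring
  | case5 pa ca ta pb cb tb h1 h2 ih =>
    intro k
    have hab : pa = pb := le_antisymm (not_lt.mp h2) (not_lt.mp h1)
    rw [mergeRLE, if_neg h1, if_neg h2]
    simp only [cnt, ih k, hab]
    split_ifs <;> ring

theorem grp_spec : ∀ (n : Nat) (l : List String), l.length ≤ n →
    GoodRLE (grp l) ∧ ∀ k, cnt (grp l) k = ((l.count k : Nat) : Int) := by
  intro n
  induction n with
  | zero =>
    intro l hlen
    have : l = [] := List.eq_nil_of_length_eq_zero (Nat.le_zero.mp hlen)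
    subst this
    rw [grp]
    simp [GoodRLE, cnt]
  | succ n ih =>
    intro l hlen
    rw [grp]
    by_cases h : l.length ≤ 1
    · rw [if_pos h]
      match l, h with
      | [], _ => simp [GoodRLE, cnt]
      | [x], _ =>
        refine ⟨⟨by simp, by simp⟩, ?_⟩
        intro k
        by_cases hk : x = k <;> simp [cnt, hk]
    · rw [if_neg h]
      have hlen2 : 2 ≤ l.length := by omega
      have h1 : (l.take (l.length / 2)).length ≤ n := by
        simp only [List.length_take]; omega
      have h2 : (l.drop (l.length / 2)).length ≤ n := by
        simp only [List.length_drop]; omega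
      obtain ⟨hg1, hc1⟩ := ih _ h1
      obtain ⟨hg2, hc2⟩ := ih _ h2
      refine ⟨mergeRLE_good _ _ hg1 hg2, ?_⟩
      intro k
      rw [mergeRLE_cnt, hc1, hc2]
      have : l.count k = (l.take (l.length / 2)).count k + (l.drop (l.length / 2)).count k := by
        conv_lhs => rw [← List.take_append_drop (l.length / 2) l]
        rw [List.count_append]
      rw [this]
      push_cast
      ring

-- a multiset of particles has exactly one well-formed run-length encoding
theorem rle_unique : ∀ (r1 r2 : List (String × Int)), GoodRLE r1 → GoodRLE r2 →
    (∀ k, cnt r1 k = cnt r2 k) → r1 = r2 := by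
  intro r1
  induction r1 with
  | nil =>
    rintro r2 _ ⟨h2pw, h2pos⟩ hc
    cases r2 with
    | nil => rfl
    | cons qd t2 =>
      obtain ⟨q, d⟩ := qd
      exfalso
      have hq_notin : q ∉ t2.map Prod.fst := by
        intro hq
        exact lt_irrefl q ((List.pairwise_cons.mp h2pw).1 q hq)
      have hcq := hc q
      rw [cnt_nil, cnt_cons, if_pos rfl, cnt_eq_zero hq_notin, add_zero] at hcq
      have := h2pos (q, d) (by simp)
      omega
  | cons pc t1 ih =>
    obtain ⟨p, c⟩ := pc
    rintro r2 ⟨h1pw, h1pos⟩ ⟨h2pw, h2pos⟩ hc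
    have hp_notin : p ∉ t1.map Prod.fst := by
      intro hp
      exact lt_irrefl p ((List.pairwise_cons.mp h1pw).1 p hp)
    have hcpos : 0 < c := h1pos (p, c) (by simp)
    cases r2 with
    | nil =>
      exfalso
      have hcp := hc p
      rw [cnt_nil, cnt_cons, if_pos rfl, cnt_eq_zero hp_notin, add_zero] at hcp
      omega
    | cons qd t2 =>
      obtain ⟨q, d⟩ := qd
      have hq_notin : q ∉ t2.map Prod.fst := by
        intro hq
        exact lt_irrefl q ((List.pairwise_cons.mp h2pw).1 q hq)
      have hdpos : 0 < d := h2pos (q, d) (by simp)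
      -- the two head keys coincide: each is the least key with positive multiplicity
      have hpq : p = q := by
        by_contra hne
        have hcp := hc p
        have hcq := hc q
        rw [cnt_cons, cnt_cons, if_pos rfl, if_neg (Ne.symm hne),
          cnt_eq_zero hp_notin, add_zero, zero_add] at hcp
        rw [cnt_cons, cnt_cons, if_neg hne, if_pos rfl,
          cnt_eq_zero hq_notin, add_zero, zero_add] at hcq
        have hp_mem : p ∈ t2.map Prod.fst := by
          by_contra hnp
          rw [cnt_eq_zero hnp] at hcp
          omega
        have hq_mem : q ∈ t1.map Prod.fst := by
          by_contra hnq
          rw [cnt_eq_zero hnq] at hcq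
          omega
        have h1 : q < p := (List.pairwise_cons.mp h2pw).1 p hp_mem
        have h2 : p < q := (List.pairwise_cons.mp h1pw).1 q hq_mem
        exact absurd (lt_trans h1 h2) (lt_irrefl q)
      subst hpq
      have hcd : c = d := by
        have h := hc p
        rw [cnt_cons, cnt_cons, if_pos rfl, if_pos rfl,
          cnt_eq_zero hp_notin, cnt_eq_zero hq_notin, add_zero, add_zero] at h
        exact h
      subst hcd
      have htail : ∀ k, cnt t1 k = cnt t2 k := by
        intro k
        have h := hc k
        rw [cnt_cons, cnt_cons] at h
        omega
      have h1' : GoodRLE t1 :=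
        ⟨(List.pairwise_cons.mp h1pw).2, fun pc h => h1pos pc (by simp [h])⟩
      have h2' : GoodRLE t2 :=
        ⟨(List.pairwise_cons.mp h2pw).2, fun pc h => h2pos pc (by simp [h])⟩
      rw [ih t2 h1' h2' htail]

-- A's grouping and B's grouping produce the same run-length encoding
theorem grp_eq_runs_sorted (plist : List String) :
    grp plist = runs (PySem.List.sorted plist (fun x => x) false) := by
  set s := PySem.List.sorted plist (fun x => x) false with hsdef
  have hs_perm : s.Perm plist := PySem.List.sorted_perm plist (fun x => x) false
  have hs_pw : s.Pairwise (· ≤ ·) := PySem.List.sorted_pairwise plist (fun x => x)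
  obtain ⟨hrpw, hrmem, hrcnt⟩ := runs_spec s.length s le_rfl hs_pw
  obtain ⟨hggood, hgcnt⟩ := grp_spec plist.length plist le_rfl
  have hrgood : GoodRLE (runs s) := by
    refine ⟨hrpw, ?_⟩
    intro pc hpc
    have hmem : pc.1 ∈ s := (hrmem pc.1).mp (List.mem_map_of_mem hpc)
    have : 1 ≤ s.count pc.1 := List.one_le_count_iff.mpr hmem
    rw [hrcnt pc hpc]
    exact_mod_cast this
  have hr_cnt_all : ∀ k, cnt (runs s) k = ((s.count k : Nat) : Int) := by
    intro k
    by_cases hk : k ∈ (runs s).map Prod.fst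
    · obtain ⟨pc, hpc, hfst⟩ := List.mem_map.mp hk
      subst hfst
      rw [cnt_of_nodup (runs s) (hrpw.imp ne_of_lt) pc hpc, hrcnt pc hpc]
    · rw [cnt_eq_zero hk]
      have : k ∉ s := fun h => hk ((hrmem k).mpr h)
      rw [List.count_eq_zero.mpr this]
      simp
  apply rle_unique _ _ hggood hrgood
  intro k
  rw [hgcnt k, hr_cnt_all k, hs_perm.count_eq k]

-- ===== VERDICT (by name: the statement is the Claim_ definition above) =====
theorem particle_list_to_string_spec : Claim_equal_particle_list_to_string := by
  intro plist group _
  unfold Spec_particle_list_to_string particle_list_to_string particle_list_to_string_alt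
  rw [grp_eq_runs_sorted]
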